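-- pv_equiv track=rewrite | github.com/Louw115/neurop-forge | neurop_forge/sources/heap_utilities.py | _heapify_up
-- ===== SOURCE A (Python) =====
-- def _parent_index(index: int) -> int:
--     """Get parent index."""
--     return (index - 1) // 2
--
-- def _should_swap(heap_type: str, parent_val, child_val) -> bool:
--     """Determine if parent and child should swap."""
--     if heap_type == "min":
--         return child_val < parent_val
--     return child_val > parent_val
--
-- def _heapify_up(items: list, heap_type: str, index: int) -> list:
--     """Bubble up to maintain heap property."""
--     result = list(items)
--     while index > 0:
--         parent = _parent_index(index)
--         if _should_swap(heap_type, result[parent], result[index]):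
--             result[parent], result[index] = result[index], result[parent]
--             index = parent
--         else:
--             break
--     return result
-- ===== SOURCE B (Python) =====
-- def _heapify_up(items: list, heap_type: str, index: int) -> list:
--     """Path-rotation formulation: precompute the ancestor path of `index`, count
--     how many consecutive ancestors the child beats, then build the whole output
--     in one comprehension (destination gets the child, each displaced ancestor
--     slot gets its own parent's original value, everything else is unchanged)."""
--     if index <= 0:
--         return list(items)
--     child = items[index]
--     path = [index]
--     while path[-1] > 0:
--         path.append((path[-1] - 1) // 2)
--     k = 0
--     for anc in path[1:]:
--         if (child < items[anc]) if heap_type == "min" else (child > items[anc]):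
--             k += 1
--         else:
--             break
--     dest = path[k]
--     displaced = path[:k]
--     return [child if p == dest
--             else items[(p - 1) // 2] if p in displaced
--             else v
--             for p, v in enumerate(items)]
-- ===== Notes on version B (the rewrite author's own statement) =====
-- stated objective: alternative
-- what changed: Replaces A's in-place swap loop by a staged path-rotation: B first materialises the ancestor path of index, counts in a pure scan how many consecutive ancestors the child beats, and then builds the entire output list in a single comprehension (destination slot gets the child, each displaced path slot gets its own parent's original value, all other slots copy through) - no element is ever swapped or mutated.
import Mathlib
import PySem

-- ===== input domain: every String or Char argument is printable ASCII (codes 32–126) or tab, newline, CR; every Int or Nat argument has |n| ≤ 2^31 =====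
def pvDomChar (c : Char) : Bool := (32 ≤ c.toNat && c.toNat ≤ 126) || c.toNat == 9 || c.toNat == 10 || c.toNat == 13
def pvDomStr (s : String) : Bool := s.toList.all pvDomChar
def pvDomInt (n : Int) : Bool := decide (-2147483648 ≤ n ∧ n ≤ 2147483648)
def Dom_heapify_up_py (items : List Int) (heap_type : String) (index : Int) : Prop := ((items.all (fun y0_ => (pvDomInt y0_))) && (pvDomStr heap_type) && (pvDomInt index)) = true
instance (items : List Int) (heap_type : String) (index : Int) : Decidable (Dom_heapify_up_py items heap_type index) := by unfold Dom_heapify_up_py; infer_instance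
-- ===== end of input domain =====

-- B replaces A's in-place swap loop by a staged path-rotation: build the ancestor path,
-- count beaten ancestors in a pure scan, then emit the whole output in one comprehension;
-- alternative decomposition, same asymptotic cost. A copies its input before mutating,
-- so only the return value is observable.


-- ===== PORT A =====
-- _should_swap
def pvShouldSwap (heap_type : String) (parent_val child_val : Int) : Bool :=
  if heap_type = "min" then child_val < parent_val else parent_val < child_val

-- A's while loop, index carried as a Nat (it only runs while index > 0; parent = (index-1)//2).
-- result[parent]/result[index] read with getD 0; Pre_ keeps index < length so every access is in range.
def pvALoop (heap_type : String) : Nat → List Int → List Int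
  | 0, r => r
  | i + 1, r =>
    let parent := i / 2
    let pv := r.getD parent 0
    let cv := r.getD (i + 1) 0
    if pvShouldSwap heap_type pv cv then
      pvALoop heap_type parent ((r.set parent cv).set (i + 1) pv)
    else r
termination_by i _ => i
decreasing_by exact Nat.lt_succ_of_le (Nat.div_le_self i 2)

def heapify_up_py (items : List Int) (heap_type : String) (index : Int) : List Int :=
  pvALoop heap_type index.toNat items

-- ===== PORT B =====
-- Source B's `while path[-1] > 0: path.append((path[-1]-1)//2)`: the ancestors of i, strictly
-- above i, ending at 0; indices are nonnegative so the path is carried as Nats.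
def pvAncTail : Nat → List Nat
  | 0 => []
  | i + 1 => (i / 2) :: pvAncTail (i / 2)
termination_by i => i
decreasing_by exact Nat.lt_succ_of_le (Nat.div_le_self i 2)

-- Source B's `for anc in path[1:]` counting loop with break.
def pvBeat (heap_type : String) (items : List Int) (child : Int) : List Nat → Nat
  | [] => 0
  | a :: rest =>
    if pvShouldSwap heap_type (items.getD a 0) child then 1 + pvBeat heap_type items child rest
    else 0

-- Source B's closing comprehension `[... for p, v in enumerate(items)]`, ported over the
-- positions 0..len-1 with v = items[p]; `items[(p-1)//2]` is only evaluated for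
-- p ∈ displaced, where p ≥ 1, so Nat (p-1)/2 is exact there.
def pvBuild (items : List Int) (child : Int) (dest : Nat) (displaced : List Nat) : List Int :=
  (List.range items.length).map (fun p =>
    if p = dest then child
    else if p ∈ displaced then items.getD ((p - 1) / 2) 0
    else items.getD p 0)

def heapify_up_py_alt (items : List Int) (heap_type : String) (index : Int) : List Int :=
  if index ≤ 0 then items
  else
    let i := index.toNat
    let child := items.getD i 0
    let path := i :: pvAncTail i
    let k := pvBeat heap_type items child (pvAncTail i)
    pvBuild items child (path.getD k 0) (path.take k)

-- ===== PRECONDITION & SPEC =====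
-- Pre_ excludes exactly the inputs where A raises IndexError: a positive index out of range.
def Pre_heapify_up_py (items : List Int) (heap_type : String) (index : Int) : Prop :=
  index ≤ 0 ∨ index < (items.length : Int)
instance (items : List Int) (heap_type : String) (index : Int) : Decidable (Pre_heapify_up_py items heap_type index) := by unfold Pre_heapify_up_py; infer_instance
def pvWitness_heapify_up_py : List Int × String × Int := ([3, 1, 4], "min", 2)

def Spec_heapify_up_py (items : List Int) (heap_type : String) (index : Int) (out : List Int) : Prop := out = heapify_up_py_alt items heap_type index
instance (items : List Int) (heap_type : String) (index : Int) (out : List Int) : Decidable (Spec_heapify_up_py items heap_type index out) := by unfold Spec_heapify_up_py; infer_instance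

-- ===== CLAIM (what is proved, stated in full; the proofs are below) =====
def Claim_equal_heapify_up_py : Prop := ∀ (items : List Int) (heap_type : String) (index : Int), Dom_heapify_up_py items heap_type index → Pre_heapify_up_py items heap_type index → Spec_heapify_up_py items heap_type index (heapify_up_py items heap_type index)

-- ===== LEMMAS AND PROOFS =====

theorem pvAncTail_lt : ∀ i, ∀ a ∈ pvAncTail i, a < i := by
  intro i
  induction i using Nat.strong_induction_on with
  | _ i ih =>
    match i with
    | 0 => intro a ha; simp [pvAncTail] at ha
    | i + 1 =>
      intro a ha
      rw [pvAncTail] at ha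
      rcases List.mem_cons.mp ha with h | h
      · omega
      · have := ih (i / 2) (by omega) a h; omega

theorem pvPath_le (i : Nat) (k : Nat) : (i :: pvAncTail i).getD k 0 ≤ i := by
  cases k with
  | zero => simp
  | succ k =>
    simp only [List.getD, List.getElem?_cons_succ]
    cases h : (pvAncTail i)[k]? with
    | none => simp
    | some a =>
      have := pvAncTail_lt i a (List.mem_of_getElem? h)
      simp only [Option.getD_some]; omega

theorem pvTake_mem_le (i : Nat) (k : Nat) (a : Nat) (ha : a ∈ (i :: pvAncTail i).take k) : a ≤ i := by
  have := List.mem_of_mem_take ha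
  rcases List.mem_cons.mp this with h | h
  · omega
  · exact Nat.le_of_lt (pvAncTail_lt i a h)

theorem pvBeat_congr (heap_type : String) (c : Int) (r r' : List Int) :
    ∀ l : List Nat, (∀ a ∈ l, r'.getD a 0 = r.getD a 0) →
      pvBeat heap_type r' c l = pvBeat heap_type r c l := by
  intro l
  induction l with
  | nil => intro _; rfl
  | cons a rest ih =>
    intro h
    rw [pvBeat, pvBeat, h a (by simp)]
    by_cases hs : pvShouldSwap heap_type (r.getD a 0) c
    · rw [if_pos hs, if_pos hs, ih (fun b hb => h b (by simp [hb]))]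
    · rw [if_neg hs, if_neg hs]

theorem pvBuild_nil (items : List Int) (c : Int) (d : Nat) (_hd : d < items.length) :
    pvBuild items c d [] = items.set d c := by
  apply List.ext_getElem
  · simp [pvBuild]
  · intro q h1 h2
    simp only [pvBuild, List.getElem_map, List.getElem_range, List.not_mem_nil, if_false,
      List.getElem_set]
    have hq : q < items.length := by simpa [pvBuild] using h1
    by_cases hqd : q = d
    · simp [hqd]
    · simp only [hqd, if_false, List.getD, List.getElem?_eq_getElem hq, Option.getD_some]
      exact (if_neg (fun h => hqd h.symm)).symm

-- The swap step absorbed into the path picture: shifting the parent value down into slot i+1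
-- and continuing from the parent equals extending destination/displaced data by one step.
theorem pvBuild_step (items : List Int) (c pv : Int) (i : Nat) (d : Nat) (S : List Nat)
    (hpv : pv = items.getD (i / 2) 0)
    (hd : d ≤ i / 2) (hS : ∀ a ∈ S, a ≤ i / 2) :
    pvBuild (items.set (i + 1) pv) c d S = pvBuild items c d ((i + 1) :: S) := by
  apply List.ext_getElem
  · simp [pvBuild]
  · intro q h1 h2
    have hq : q < items.length := by simpa [pvBuild] using h2
    simp only [pvBuild, List.getElem_map, List.getElem_range, List.length_set, List.mem_cons]
    have hdlt : d < i + 1 := by omega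
    by_cases hqd : q = d
    · simp [hqd]
    · simp only [hqd, if_false]
      by_cases hqi : q = i + 1
      · subst hqi
        have hqS : (i + 1) ∉ S := fun h => by have := hS _ h; omega
        rw [if_neg hqS, if_pos (Or.inl rfl), hpv]
        simp only [List.getD]
        rw [List.getElem?_set_self (by omega)]
        simp
      · by_cases hqS : q ∈ S
        · have h1' : (q - 1) / 2 < i + 1 := by have := hS q hqS; omega
          rw [if_pos hqS, if_pos (Or.inr hqS)]
          simp only [List.getD]
          rw [List.getElem?_set_ne (by omega)]
        · have hor : ¬ (q = i + 1 ∨ q ∈ S) := by tauto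
          rw [if_neg hqS, if_neg hor]
          simp only [List.getD]
          rw [List.getElem?_set_ne (by omega)]

-- Main invariant: A's swap loop started at i on a list whose slot i holds c equals B's
-- path-rotation computed from the untouched list r and the saved child c.
theorem pvKey (heap_type : String) (c : Int) :
    ∀ (i : Nat) (r : List Int), i < r.length →
      pvALoop heap_type i (r.set i c) =
        pvBuild r c ((i :: pvAncTail i).getD (pvBeat heap_type r c (pvAncTail i)) 0)
          ((i :: pvAncTail i).take (pvBeat heap_type r c (pvAncTail i))) := by
  intro i
  induction i using Nat.strong_induction_on with
  | _ i ih =>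
    intro r hi
    match i with
    | 0 =>
      simp only [pvALoop, pvAncTail, pvBeat, List.getD, List.getElem?_cons_zero, Option.getD_some,
        List.take_zero]
      rw [pvBuild_nil r c 0 (by omega)]
    | i + 1 =>
      rw [pvALoop, pvAncTail, pvBeat]
      have hp : i / 2 < i + 1 := by omega
      have hlen : i + 1 < r.length := hi
      have hpv : (r.set (i + 1) c).getD (i / 2) 0 = r.getD (i / 2) 0 := by
        rw [List.getD, List.getD, List.getElem?_set_ne (by omega)]
      have hcv : (r.set (i + 1) c).getD (i + 1) 0 = c := by
        rw [List.getD, List.getElem?_set_self (by omega)]; simp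
      simp only [hpv, hcv]
      by_cases hs : pvShouldSwap heap_type (r.getD (i / 2) 0) c
      · simp only [hs, if_true]
        -- A's next list: ((r.set (i+1) c).set (i/2) c).set (i+1) pv = (r.set (i+1) pv).set (i/2) c
        have hre : ((r.set (i + 1) c).set (i / 2) c).set (i + 1) (r.getD (i / 2) 0)
            = (r.set (i + 1) (r.getD (i / 2) 0)).set (i / 2) c := by
          rw [List.set_comm c _ (by omega), List.set_set]
        rw [hre]
        set r'' := r.set (i + 1) (r.getD (i / 2) 0) with hr''
        have hlen'' : i / 2 < r''.length := by rw [hr'', List.length_set]; omega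
        rw [ih (i / 2) hp r'' hlen'']
        have hcong : pvBeat heap_type r'' c (pvAncTail (i / 2)) = pvBeat heap_type r c (pvAncTail (i / 2)) := by
          apply pvBeat_congr
          intro a ha
          have : a < i / 2 := pvAncTail_lt _ a ha
          rw [hr'']
          simp only [List.getD]
          rw [List.getElem?_set_ne (by omega)]
        rw [hcong]
        set k := pvBeat heap_type r c (pvAncTail (i / 2)) with hk
        -- fold B's cons-shapes on the RHS
        have h1k : 1 + k = k + 1 := by omega
        have hdest : ((i + 1) :: i / 2 :: pvAncTail (i / 2)).getD (1 + k) 0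
            = (i / 2 :: pvAncTail (i / 2)).getD k 0 := by
          rw [h1k]; simp [List.getD]
        have htake : ((i + 1) :: i / 2 :: pvAncTail (i / 2)).take (1 + k)
            = (i + 1) :: ((i / 2 :: pvAncTail (i / 2)).take k) := by
          rw [h1k, List.take_succ_cons]
        rw [hdest, htake]
        exact pvBuild_step r c (r.getD (i / 2) 0) i _ _ rfl
          (by simpa using pvPath_le (i / 2) k)
          (fun a ha => pvTake_mem_le (i / 2) k a ha)
      · simp only [hs, Bool.false_eq_true, if_false, List.take_zero]
        have h00 : ((i + 1) :: i / 2 :: pvAncTail (i / 2)).getD 0 0 = i + 1 := by simp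
        rw [h00, pvBuild_nil r c (i + 1) hlen]

theorem pvSet_getD_self (r : List Int) (i : Nat) (hi : i < r.length) :
    r.set i (r.getD i 0) = r := by
  simp [List.getD, List.getElem?_eq_getElem hi, List.set_getElem_self]

-- ===== VERDICT (by name: the statement is the Claim_ definition above) =====
theorem heapify_up_py_spec : Claim_equal_heapify_up_py := by
  intro items heap_type index _ hpre
  unfold Spec_heapify_up_py heapify_up_py heapify_up_py_alt
  by_cases h0 : index ≤ 0
  · have : index.toNat = 0 := by omega
    simp [h0, this, pvALoop]
  · have hlen : index.toNat < items.length := by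
      rcases hpre with h | h
      · omega
      · omega
    simp only [h0, if_false]
    have := pvKey heap_type (items.getD index.toNat 0) index.toNat items hlen
    rw [pvSet_getD_self items index.toNat hlen] at this
    exact this
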